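-- pv_equiv track=rewrite | github.com/AlanaLeg/MesExos | NSI/NSI Term en classe/Python/Projet_MotMystere/Projet_Mot Mystere.py | mot_mystere
-- ===== SOURCE A (Python) =====
-- def mot_mystere(mot):
--     mot_m= ""
--     for i in range(len(mot)):
--         if mot[i] == "-":
--             mot_m += "-"
--         elif i == -1:
--             mot_m += "_"
--         else:
--             mot_m += "_ "
--     return mot_m
-- ===== SOURCE B (Python) =====
-- def mot_mystere(mot):
--     return "-".join("_ " * len(seg) for seg in mot.split("-"))
-- ===== Notes on version B (the rewrite author's own statement) =====
-- stated objective: faster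
-- what changed: Replaced the index-by-index character scan that appends one piece per character onto a growing string with a delimiter-based reconstruction: split the word on the dash, expand each segment to the underscore-space placeholder repeated its length, and join the pieces back with dashes.
import Mathlib
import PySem

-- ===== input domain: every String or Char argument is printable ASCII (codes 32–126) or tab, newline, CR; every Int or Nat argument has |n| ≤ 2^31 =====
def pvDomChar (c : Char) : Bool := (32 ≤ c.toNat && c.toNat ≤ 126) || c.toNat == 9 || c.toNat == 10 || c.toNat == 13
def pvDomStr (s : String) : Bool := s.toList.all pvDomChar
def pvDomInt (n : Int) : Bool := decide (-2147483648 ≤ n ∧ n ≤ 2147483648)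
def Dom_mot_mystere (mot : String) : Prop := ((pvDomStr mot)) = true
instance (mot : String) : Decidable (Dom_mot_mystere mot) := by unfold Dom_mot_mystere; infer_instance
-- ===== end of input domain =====

-- B replaces A's per-index scan with quadratic string concatenation by split-on-dash / expand-each-segment / join (measured faster; same result).

-- ===== PORT A =====
-- literal port of A: for i in range(len(mot)): test mot[i] == '-', then the dead 'i == -1' branch, else append '_ '
def mot_mystere (mot : String) : String :=
  String.ofList ((PySem.List.pyRange 0 (mot.toList.length : Int) 1).foldl
    (fun acc i =>
      match PySem.List.pyGet? mot.toList i with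
      | some c =>
        if c = '-' then acc ++ ['-']
        else if i = -1 then acc ++ ['_']
        else acc ++ ['_', ' ']
      | none => acc)   -- unreachable: i ranges over valid indices, Python never raises here
    [])

-- ===== PORT B =====
-- literal port of B: "-".join("_ " * len(seg) for seg in mot.split("-"))
def mot_mystere_alt (mot : String) : String :=
  String.ofList (PySem.Chars.join ['-']
    ((PySem.Chars.splitOn mot.toList ['-']).map
      (fun seg => PySem.List.pyRepeat ['_', ' '] (seg.length : Int))))

-- ===== PRECONDITION & SPEC =====
def Spec_mot_mystere (mot : String) (out : String) : Prop := out = mot_mystere_alt mot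
instance (mot : String) (out : String) : Decidable (Spec_mot_mystere mot out) := by unfold Spec_mot_mystere; infer_instance

-- ===== CLAIM (what is proved, stated in full; the proofs are below) =====
def Claim_equal_mot_mystere : Prop := ∀ (mot : String), Dom_mot_mystere mot → Spec_mot_mystere mot (mot_mystere mot)

-- ===== LEMMAS AND PROOFS =====

-- the per-character mask both programs compute
def pvMask (c : Char) : List Char := if c = '-' then ['-'] else ['_', ' ']

-- apply a function to the head of a list (lists here are always nonempty)
def pvMapHead (f : List Char → List Char) : List (List Char) → List (List Char)
  | [] => []
  | p :: ps => f p :: ps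

-- structural reference for splitting a char list on '-'
def pvRef : List Char → List (List Char)
  | [] => [[]]
  | c :: t => if c = '-' then [] :: pvRef t else pvMapHead (fun p => c :: p) (pvRef t)

theorem pvRef_ne_nil (cs : List Char) : pvRef cs ≠ [] := by
  induction cs with
  | nil => simp [pvRef]
  | cons c t ih =>
    simp only [pvRef]
    split
    · simp
    · cases h : pvRef t with
      | nil => exact absurd h ih
      | cons p ps => simp [pvMapHead]

theorem pvMapHead_mapHead (f g : List Char → List Char) (l : List (List Char)) :
    pvMapHead f (pvMapHead g l) = pvMapHead (fun p => f (g p)) l := by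
  cases l <;> simp [pvMapHead]

-- splitOn.go with a single-char separator, enough fuel
theorem pvGo_spec (l : List Char) : ∀ (fuel : Nat) (cur : List Char) (acc : List (List Char)),
    l.length < fuel →
    PySem.Chars.splitOn.go ['-'] fuel l cur acc
      = acc.reverse ++ pvMapHead (fun p => cur.reverse ++ p) (pvRef l) := by
  induction l with
  | nil =>
    intro fuel cur acc h
    match fuel, h with
    | fuel + 1, _ => simp [PySem.Chars.splitOn.go, pvRef, pvMapHead]
  | cons c t ih =>
    intro fuel cur acc h
    match fuel, h with
    | fuel + 1, h =>
      by_cases hc : c = '-'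
      · subst hc
        have hpre : List.isPrefixOf ['-'] ('-' :: t) = true := by
          simp [List.isPrefixOf]
        rw [show PySem.Chars.splitOn.go ['-'] (fuel + 1) ('-' :: t) cur acc
              = PySem.Chars.splitOn.go ['-'] fuel t [] (cur.reverse :: acc) by
            simp [PySem.Chars.splitOn.go, hpre]]
        rw [ih fuel [] (cur.reverse :: acc) (by simpa using h)]
        cases hr : pvRef t with
        | nil => exact absurd hr (pvRef_ne_nil t)
        | cons p ps => simp [pvRef, pvMapHead, hr]
      · have hpre : List.isPrefixOf ['-'] (c :: t) = false := by
          simp [List.isPrefixOf]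
          intro h'; exact hc h'.symm
        rw [show PySem.Chars.splitOn.go ['-'] (fuel + 1) (c :: t) cur acc
              = PySem.Chars.splitOn.go ['-'] fuel t (c :: cur) acc by
            simp [PySem.Chars.splitOn.go, hpre]]
        rw [ih fuel (c :: cur) acc (by simpa using h)]
        rw [show pvRef (c :: t) = pvMapHead (fun p => c :: p) (pvRef t) by
          simp [pvRef, hc]]
        rw [pvMapHead_mapHead]
        cases hr : pvRef t with
        | nil => exact absurd hr (pvRef_ne_nil t)
        | cons p ps => simp [pvMapHead]

theorem pvSplitOn_eq_ref (cs : List Char) : PySem.Chars.splitOn cs ['-'] = pvRef cs := by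
  rw [PySem.Chars.splitOn, pvGo_spec cs (cs.length + 1) [] [] (by omega)]
  cases hr : pvRef cs with
  | nil => exact absurd hr (pvRef_ne_nil cs)
  | cons p ps => simp [pvMapHead]

-- B's value, characterised as a flatMap of the per-character mask
theorem pvJoin_ref (cs : List Char) :
    PySem.Chars.join ['-'] ((pvRef cs).map
        (fun seg => PySem.List.pyRepeat ['_', ' '] (seg.length : Int)))
      = cs.flatMap pvMask := by
  induction cs with
  | nil =>
    simp only [pvRef, List.map_cons, List.map_nil, PySem.Chars.join_singleton]
    simp [PySem.List.pyRepeat]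
  | cons c t ih =>
    by_cases hc : c = '-'
    · subst hc
      rw [show pvRef ('-' :: t) = [] :: pvRef t by simp [pvRef]]
      cases hr : pvRef t with
      | nil => exact absurd hr (pvRef_ne_nil t)
      | cons p ps =>
        rw [hr] at ih
        simp only [List.map_cons] at ih ⊢
        rw [PySem.Chars.join_cons_cons, ih]
        simp [PySem.List.pyRepeat, pvMask]
    · rw [show pvRef (c :: t) = pvMapHead (fun p => c :: p) (pvRef t) by simp [pvRef, hc]]
      cases hr : pvRef t with
      | nil => exact absurd hr (pvRef_ne_nil t)
      | cons p ps =>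
        rw [hr] at ih
        have hrep : ∀ n : Nat,
            PySem.List.pyRepeat ['_', ' '] ((n : Int) + 1)
              = '_' :: ' ' :: PySem.List.pyRepeat ['_', ' '] (n : Int) := by
          intro n
          have ht : ((n : Int) + 1).toNat = n + 1 := by omega
          simp [PySem.List.pyRepeat, ht, List.replicate_succ]
        cases ps with
        | nil =>
          simp only [pvMapHead, List.map_cons, List.map_nil,
            PySem.Chars.join_singleton, List.length_cons, Nat.cast_add,
            Nat.cast_one] at ih ⊢
          rw [hrep p.length, ih]
          simp [pvMask, hc]
        | cons q qs =>
          simp only [pvMapHead, List.map_cons, PySem.Chars.join_cons_cons,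
            List.length_cons, Nat.cast_add, Nat.cast_one] at ih ⊢
          rw [hrep p.length]
          simp only [List.cons_append]
          rw [ih]
          simp [pvMask, hc]

-- A's loop body at an in-range index is the mask of the character there
theorem pvGet_inrange (cs : List Char) (i : Int) (h0 : 0 ≤ i) (h1 : i < (cs.length : Int)) :
    PySem.List.pyGet? cs i = some (cs.getD i.toNat ' ') := by
  have hlt : i.toNat < cs.length := by omega
  simp [PySem.List.pyGet?, PySem.List.pyIdx?, h0, h1, List.getD_eq_getElem?_getD]

-- the index flatMap over range(len cs) is a flatMap over cs itself
theorem pvRange_flatMap (cs : List Char) :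
    (PySem.List.pyRange 0 (cs.length : Int) 1).flatMap
        (fun i => pvMask (cs.getD i.toNat ' '))
      = cs.flatMap pvMask := by
  induction cs using List.reverseRecOn with
  | nil => simp [PySem.List.pyRange]
  | append_singleton ds c ih =>
    have hlen : ((ds ++ [c]).length : Int) = (ds.length : Int) + 1 := by simp
    rw [hlen, PySem.List.pyRange_one_succ_right (by positivity), List.flatMap_append,
      List.flatMap_append]
    have hfirst : (PySem.List.pyRange 0 (ds.length : Int) 1).flatMap
        (fun i => pvMask ((ds ++ [c]).getD i.toNat ' '))
        = (PySem.List.pyRange 0 (ds.length : Int) 1).flatMap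
        (fun i => pvMask (ds.getD i.toNat ' ')) := by
      simp only [List.flatMap]
      refine congrArg List.flatten (List.map_congr_left ?_)
      intro i hi
      rw [PySem.List.mem_pyRange_one] at hi
      have hlt : i.toNat < ds.length := by omega
      rw [List.getD_eq_getElem?_getD, List.getD_eq_getElem?_getD,
        List.getElem?_append_left hlt]
    rw [hfirst, ih]
    simp

-- A's value, characterised as the same flatMap
theorem pvA_flatMap (cs : List Char) :
    (PySem.List.pyRange 0 (cs.length : Int) 1).foldl
      (fun acc i =>
        match PySem.List.pyGet? cs i with
        | some c => if c = '-' then acc ++ ['-'] else if i = -1 then acc ++ ['_'] else acc ++ ['_', ' ']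
        | none => acc) []
      = cs.flatMap pvMask := by
  have hbody : ∀ acc : List Char, ∀ i ∈ PySem.List.pyRange 0 (cs.length : Int) 1,
      (match PySem.List.pyGet? cs i with
        | some c => if c = '-' then acc ++ ['-'] else if i = -1 then acc ++ ['_'] else acc ++ ['_', ' ']
        | none => acc)
      = acc ++ pvMask (cs.getD i.toNat ' ') := by
    intro acc i hi
    rw [PySem.List.mem_pyRange_one] at hi
    rw [pvGet_inrange cs i hi.1 hi.2]
    have hne : i ≠ -1 := by omega
    simp only [pvMask]
    split <;> simp
  have h1 := PySem.List.foldl_congr_mem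
      (PySem.List.pyRange 0 (cs.length : Int) 1)
      (fun acc i =>
        match PySem.List.pyGet? cs i with
        | some c => if c = '-' then acc ++ ['-'] else if i = -1 then acc ++ ['_'] else acc ++ ['_', ' ']
        | none => acc)
      (fun acc i => acc ++ pvMask (cs.getD i.toNat ' '))
      [] (fun acc i hi => hbody acc i hi)
  rw [h1, PySem.List.foldl_append_eq_flatMap, List.nil_append]
  exact pvRange_flatMap cs

-- ===== VERDICT (by name: the statement is the Claim_ definition above) =====
theorem mot_mystere_spec : Claim_equal_mot_mystere := by
  intro mot _
  show mot_mystere mot = mot_mystere_alt mot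
  unfold mot_mystere mot_mystere_alt
  rw [pvSplitOn_eq_ref, pvJoin_ref, pvA_flatMap]
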